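-- pv_equiv track=rewrite | github.com/xiexr151e/DungeonFinalProject | shopping.py | buildquote
-- ===== SOURCE A (Python) =====
-- def buildquote(quote, words):
--     current = 0
--     final = ""
--     for i in range(len(quote)):
--         if quote[i] == '*':
--             final += words[current]
--             current += 1
--         else:
--             final += quote[i]
--     return final
-- ===== SOURCE B (Python) =====
-- def buildquote(quote, words):
--     parts = quote.split('*')
--     res = parts[0]
--     for i in range(1, len(parts)):
--         res += words[i - 1] + parts[i]
--     return res
-- ===== Notes on version B (the rewrite author's own statement) =====
-- stated objective: simpler
-- what changed: Replaces A's character-by-character loop with a words-index counter by splitting the quote on '*' once and looping over the resulting segments, indexing words[i-1] directly so that too-few words raises IndexError exactly as A does.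
import Mathlib
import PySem

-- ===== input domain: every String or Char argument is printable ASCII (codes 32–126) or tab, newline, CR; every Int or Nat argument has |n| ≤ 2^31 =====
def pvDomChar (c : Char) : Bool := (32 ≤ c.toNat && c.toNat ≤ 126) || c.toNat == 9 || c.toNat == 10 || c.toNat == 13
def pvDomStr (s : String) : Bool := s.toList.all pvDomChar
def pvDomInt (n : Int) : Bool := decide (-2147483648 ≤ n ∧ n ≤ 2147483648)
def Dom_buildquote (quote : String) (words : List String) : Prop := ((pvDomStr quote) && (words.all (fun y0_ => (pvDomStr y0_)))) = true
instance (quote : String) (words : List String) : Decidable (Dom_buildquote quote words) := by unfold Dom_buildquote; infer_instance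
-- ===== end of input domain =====

-- B replaces A's character-by-character loop with split-on-'*' and a loop over the segments,
-- indexing words[i-1] directly (objective: simpler).

-- ===== PORT A =====
-- the for-loop over quote's characters, state (current, final); words[current] raises
-- IndexError when current is out of range — those inputs are excluded by Pre_ below,
-- so the getD default is never reached inside Pre_.
def buildquoteGo (words : List String) (cs : List Char) (current : Nat) (final : String) : String :=
  match cs with
  | [] => final
  | c :: rest =>
    if c = '*' then buildquoteGo words rest (current + 1) (final ++ words.getD current "")
    else buildquoteGo words rest current (final.push c)

def buildquote (quote : String) (words : List String) : String :=
  buildquoteGo words quote.toList 0 ""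

-- ===== PORT B =====
-- quote.split('*') ported as the corresponding library function List.splitOn on the characters;
-- the for-loop over range(1, len(parts)) ported as a foldl over that index range;
-- words[i-1] raises IndexError when words is too short — excluded by Pre_, so the getD
-- default is never reached inside Pre_.
def buildquote_alt (quote : String) (words : List String) : String :=
  let parts : List String := (quote.toList.splitOn '*').map String.ofList
  (List.range' 1 (parts.length - 1)).foldl
    (fun res i => res ++ words.getD (i - 1) "" ++ parts.getD i "") (parts.headD "")

-- ===== PRECONDITION & SPEC =====
-- Pre_ excludes exactly the inputs where A raises IndexError: fewer words than '*' placeholders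
-- (B raises IndexError on exactly the same inputs).
def Pre_buildquote (quote : String) (words : List String) : Prop :=
  quote.toList.count '*' ≤ words.length
instance (quote : String) (words : List String) : Decidable (Pre_buildquote quote words) := by
  unfold Pre_buildquote; infer_instance

def pvWitness_buildquote : String × List String := ("say * and *!", ["this", "that"])

def Spec_buildquote (quote : String) (words : List String) (out : String) : Prop := out = buildquote_alt quote words
instance (quote : String) (words : List String) (out : String) : Decidable (Spec_buildquote quote words out) := by unfold Spec_buildquote; infer_instance

-- ===== CLAIM (what is proved, stated in full; the proofs are below) =====
def Claim_equal_buildquote : Prop := ∀ (quote : String) (words : List String), Dom_buildquote quote words → Pre_buildquote quote words → Spec_buildquote quote words (buildquote quote words)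

-- ===== LEMMAS AND PROOFS =====

-- the common character-level specification both ports are reduced to
def render (cs : List Char) (ws : List String) : List Char :=
  match cs with
  | [] => []
  | c :: rest => if c = '*' then (ws.headD "").toList ++ render rest ws.tail else c :: render rest ws

theorem buildquoteGo_toList (words : List String) :
    ∀ (cs : List Char) (current : Nat) (final : String),
      (buildquoteGo words cs current final).toList
        = final.toList ++ render cs (words.drop current) := by
  intro cs
  induction cs with
  | nil => intro current final; simp [buildquoteGo, render]
  | cons c rest ih =>
    intro current final
    by_cases hc : c = '*'
    · simp [buildquoteGo, render, hc, ih, List.tail_drop, List.getD, List.head?_drop]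
    · simp [buildquoteGo, render, hc, ih]

theorem splitOn_ne_nil (cs : List Char) : cs.splitOn '*' ≠ [] := by
  simp [List.splitOn, List.splitOnP_ne_nil]

theorem count_eq_splitOn_tail_length (cs : List Char) :
    cs.count '*' = (cs.splitOn '*').tail.length := by
  induction cs with
  | nil => simp [List.splitOn]
  | cons c rest ih =>
    obtain ⟨p0, pt, hP⟩ : ∃ p0 pt, rest.splitOn '*' = p0 :: pt := by
      cases hr : rest.splitOn '*' with
      | nil => exact absurd hr (splitOn_ne_nil rest)
      | cons a b => exact ⟨a, b, rfl⟩
    by_cases hc : c = '*'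
    · rw [hP] at ih
      simp only [List.splitOn, List.splitOnP_cons] at *
      simp [hc, hP, ih]
    · rw [hP] at ih
      simp only [List.splitOn, List.splitOnP_cons] at *
      simp [hc, hP, ih]

-- the zip-level characterisation of render on the split segments
theorem altChars (cs : List Char) (ws : List String)
    (h : cs.count '*' ≤ ws.length) :
    ((cs.splitOn '*').headD [])
      ++ ((ws.zip (cs.splitOn '*').tail).map (fun wp => wp.1.toList ++ wp.2)).flatten
      = render cs ws := by
  induction cs generalizing ws with
  | nil => simp [List.splitOn, render]
  | cons c rest ih =>
    obtain ⟨p0, pt, hP⟩ : ∃ p0 pt, rest.splitOn '*' = p0 :: pt := by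
      cases hr : rest.splitOn '*' with
      | nil => exact absurd hr (splitOn_ne_nil rest)
      | cons a b => exact ⟨a, b, rfl⟩
    by_cases hc : c = '*'
    · have hws : ∃ w ws', ws = w :: ws' := by
        cases ws with
        | nil => simp [hc] at h
        | cons w ws' => exact ⟨w, ws', rfl⟩
      obtain ⟨w, ws', rfl⟩ := hws
      have h' : rest.count '*' ≤ ws'.length := by
        simp [hc] at h; omega
      have := ih ws' h'
      rw [hP] at this
      simp only [List.splitOn, List.splitOnP_cons] at *
      simp [hc, hP, render, ← this]
    · have := ih ws (by simpa [hc] using h)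
      rw [hP] at this
      simp only [List.splitOn, List.splitOnP_cons] at *
      simp [hc, hP, render, ← this]

-- B's index fold over range' 1 n equals the zip form (reverse induction on n)
theorem fold_index_eq_zip (ws : List String) (p0 : String) (pt : List String) :
    ∀ (n : Nat), n ≤ ws.length → n ≤ pt.length → ∀ (init : String),
      (List.range' 1 n).foldl
        (fun res i => res ++ ws.getD (i - 1) "" ++ (p0 :: pt).getD i "") init
      = init ++ String.join (((ws.take n).zip (pt.take n)).map (fun wp => wp.1 ++ wp.2)) := by
  intro n
  induction n with
  | zero => intro _ _ init; simp [String.join]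
  | succ n ih =>
    intro hw hp init
    have hw' : n < ws.length := hw
    have hp' : n < pt.length := hp
    rw [List.range'_1_concat, List.foldl_append]
    rw [ih (by omega) (by omega) init]
    have h1 : ws.getD (1 + n - 1) "" = ws[n] := by
      simp [List.getD, Nat.add_comm, List.getElem?_eq_getElem hw']
    have h2 : (p0 :: pt).getD (1 + n) "" = pt[n] := by
      simp [List.getD, Nat.add_comm, List.getElem?_eq_getElem hp']
    have htw : ws.take (n + 1) = ws.take n ++ [ws[n]] := List.take_succ_eq_append_getElem hw'
    have htp : pt.take (n + 1) = pt.take n ++ [pt[n]] := List.take_succ_eq_append_getElem hp'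
    have hz : (ws.take (n+1)).zip (pt.take (n+1))
        = (ws.take n).zip (pt.take n) ++ [(ws[n], pt[n])] := by
      rw [htw, htp, List.zip_append (by simp [hw'.le, hp'.le])]
      simp
    simp only [List.foldl_cons, List.foldl_nil, h1, h2, hz, List.map_append]
    simp [String.join, List.foldl_append, String.append_assoc]

theorem zip_take_eq {α β : Type} :
    ∀ (n : Nat) (ws : List α) (pt : List β), pt.length ≤ n →
      (ws.take n).zip (pt.take n) = ws.zip pt := by
  intro n
  induction n with
  | zero =>
    intro ws pt h
    cases pt with
    | nil => simp
    | cons q qt => simp at h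
  | succ n ih =>
    intro ws pt h
    cases pt with
    | nil => simp
    | cons q qt =>
      cases ws with
      | nil => simp
      | cons w wt => simp [ih wt qt (by simpa using h)]

theorem buildquote_alt_toList (quote : String) (words : List String)
    (hpre : Pre_buildquote quote words) :
    (buildquote_alt quote words).toList
      = ((quote.toList.splitOn '*').headD [])
          ++ ((words.zip (quote.toList.splitOn '*').tail).map
                (fun wp => wp.1.toList ++ wp.2)).flatten := by
  obtain ⟨p0, pt, hP⟩ : ∃ p0 pt, quote.toList.splitOn '*' = p0 :: pt := by
    cases hr : quote.toList.splitOn '*' with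
    | nil => exact absurd hr (splitOn_ne_nil _)
    | cons a b => exact ⟨a, b, rfl⟩
  have hlen : pt.length ≤ words.length := by
    have := count_eq_splitOn_tail_length quote.toList
    rw [hP] at this
    unfold Pre_buildquote at hpre
    simpa [this] using hpre
  unfold buildquote_alt
  rw [hP]
  simp only [List.map_cons, List.length_cons, List.length_map, Nat.add_sub_cancel,
    List.headD_cons]
  have key := fold_index_eq_zip words (String.ofList p0) (pt.map String.ofList)
    pt.length hlen (by simp) (String.ofList p0)
  rw [zip_take_eq pt.length words (pt.map String.ofList) (by simp)] at key
  rw [key]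
  rw [List.zip_map_right]
  simp [String.toList_join, Function.comp_def]

-- ===== VERDICT (by name: the statement is the Claim_ definition above) =====
theorem buildquote_spec : Claim_equal_buildquote := by
  intro quote words _ hpre
  unfold Spec_buildquote
  apply String.toList_inj.mp
  rw [buildquote_alt_toList _ _ hpre, altChars _ _ hpre]
  simpa [buildquote] using buildquoteGo_toList words quote.toList 0 ""
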